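-- pv_equiv track=rewrite | github.com/Hector-Y-SM/number_convert | roman/validation.py | limit
-- ===== SOURCE A (Python) =====
-- def limit(input):
-- 	count = 1
-- 	for i in range(1, len(input)) :
-- 		if input[i] == input[i-1] :
-- 			count+= 1
-- 			if count > 3 :
-- 				return False
-- 		else:
-- 			count = 1
-- 	return True
-- ===== SOURCE B (Python) =====
-- from itertools import groupby
--
-- def limit(input):
--     return all(sum(1 for _ in g) <= 3 for _, g in groupby(input))
-- ===== Notes on version B (the rewrite author's own statement) =====
-- stated objective: idiomatic
-- what changed: Replaces the reset-counter scan with early return by an itertools.groupby pass that partitions the string into maximal runs and checks every run length is at most 3.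
import Mathlib
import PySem

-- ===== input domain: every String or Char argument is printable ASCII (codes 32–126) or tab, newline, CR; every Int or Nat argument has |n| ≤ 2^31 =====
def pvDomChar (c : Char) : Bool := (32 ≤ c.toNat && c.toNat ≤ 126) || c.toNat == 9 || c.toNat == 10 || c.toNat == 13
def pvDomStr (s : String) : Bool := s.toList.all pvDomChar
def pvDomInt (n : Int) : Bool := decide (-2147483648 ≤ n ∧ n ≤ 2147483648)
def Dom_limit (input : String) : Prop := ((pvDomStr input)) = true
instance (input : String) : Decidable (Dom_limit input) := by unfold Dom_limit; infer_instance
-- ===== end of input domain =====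

-- B replaces A's reset-counter scan by an itertools.groupby pass over maximal runs (idiomatic; return value only).

-- ===== PORT A =====
-- A's loop over i in range(1, len(input)) comparing input[i] with input[i-1],
-- with count reset on change and early return False when count > 3,
-- as the obvious structural recursion carrying (previous char, count).
def limitLoopA : List Char → Char → Nat → Bool
  | [], _, _ => true
  | c :: rest, prev, count =>
      if c == prev then
        if count + 1 > 3 then false else limitLoopA rest c (count + 1)
      else limitLoopA rest c 1

def limit (input : String) : Bool :=
  match input.toList with
  | [] => true
  | c :: rest => limitLoopA rest c 1

-- ===== PORT B =====
-- itertools.groupby: maximal consecutive runs; B checks each run's length ≤ 3.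
-- runLens emits the lengths of the maximal runs, exactly groupby's grouping.
def runLens : Char → Nat → List Char → List Nat
  | _, n, [] => [n]
  | c, n, d :: rest => if d == c then runLens c (n + 1) rest else n :: runLens d 1 rest

def limit_alt (input : String) : Bool :=
  match input.toList with
  | [] => true
  | c :: rest => (runLens c 1 rest).all (fun k => k ≤ 3)

-- ===== PRECONDITION & SPEC =====
def Spec_limit (input : String) (out : Bool) : Prop := out = limit_alt input
instance (input : String) (out : Bool) : Decidable (Spec_limit input out) := by unfold Spec_limit; infer_instance

-- ===== CLAIM (what is proved, stated in full; the proofs are below) =====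
def Claim_equal_limit : Prop := ∀ (input : String), Dom_limit input → Spec_limit input (limit input)

-- ===== LEMMAS AND PROOFS =====
theorem runLens_all_false (rest : List Char) (c : Char) (n : Nat) (h : 3 < n) :
    (runLens c n rest).all (fun k => k ≤ 3) = false := by
  induction rest generalizing c n with
  | nil => simp [runLens]; omega
  | cons d rest ih =>
      simp only [runLens]
      split
      · exact ih c (n + 1) (by omega)
      · simp [List.all_cons]; omega

theorem loopA_eq_runLens (rest : List Char) (c : Char) (n : Nat) (h : n ≤ 3) :
    limitLoopA rest c n = (runLens c n rest).all (fun k => k ≤ 3) := by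
  induction rest generalizing c n with
  | nil => simp [limitLoopA, runLens]; omega
  | cons d rest ih =>
      simp only [limitLoopA, runLens]
      split
      · rename_i hdc
        have hd : d = c := by simpa using hdc
        subst hd
        split
        · exact (runLens_all_false rest d (n + 1) (by omega)).symm
        · exact ih d (n + 1) (by omega)
      · rw [ih d 1 (by omega)]
        simp [List.all_cons, h]

-- ===== VERDICT (by name: the statement is the Claim_ definition above) =====
theorem limit_spec : Claim_equal_limit := by
  intro input _
  unfold Spec_limit limit limit_alt
  cases input.toList with
  | nil => rfl
  | cons c rest => exact loopA_eq_runLens rest c 1 (by omega)
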